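-- pv_equiv track=rewrite | github.com/arthurpcidrao/Python | fundamentals/Truth table logic math.py | correction_parentheses
-- ===== SOURCE A (Python) =====
-- alphabet = "abcdefghijklmnopqrstuwxyzABCDEFGHIJKLMNOPQRSTUWXYZ"
--
-- def correction_parentheses(input_str):
--     output_str = ""
--     i = 0
--
--     while i < len(input_str):
--         if input_str[i] == '(':
--             j = i + 1
--             while j < len(input_str) and input_str[j] == '~':
--                 j += 1
--
--             k = j
--             while k < len(input_str) and input_str[k].isalpha() and input_str[k] in alphabet:
--                 k += 1
--
--             if k < len(input_str) and input_str[k] == ')':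
--                 output_str += input_str[i+1:k]  # Exclui os parênteses
--                 i = k + 1
--             else:
--                 output_str += input_str[i]
--                 i += 1
--         else:
--             output_str += input_str[i]
--             i += 1
--
--     return output_str
-- ===== SOURCE B (Python) =====
-- alphabet = "abcdefghijklmnopqrstuwxyzABCDEFGHIJKLMNOPQRSTUWXYZ"
--
-- def correction_parentheses(input_str):
--     n = len(input_str)
--     allowed = set(alphabet)
--     # tilde_end[i]: first index >= i whose char is not '~'
--     # alpha_end[i]: first index >= i whose char is not an allowed letter
--     tilde_end = [n] * (n + 1)
--     alpha_end = [n] * (n + 1)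
--     for i in range(n - 1, -1, -1):
--         c = input_str[i]
--         tilde_end[i] = tilde_end[i + 1] if c == '~' else i
--         alpha_end[i] = alpha_end[i + 1] if (c.isalpha() and c in allowed) else i
--     parts = []
--     i = 0
--     while i < n:
--         if input_str[i] == '(':
--             k = alpha_end[tilde_end[i + 1]]
--             if k < n and input_str[k] == ')':
--                 parts.append(input_str[i + 1:k])
--                 i = k + 1
--                 continue
--         parts.append(input_str[i])
--         i += 1
--     return "".join(parts)
-- ===== Notes on version B (the rewrite author's own statement) =====
-- stated objective: faster
-- what changed: B precomputes, in one backward pass, for every index the end of the '~'-run and of the allowed-letter-run starting there, so each '(' is checked in O(1) instead of rescanning, and joins collected parts instead of quadratic string concatenation.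
import Mathlib
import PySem

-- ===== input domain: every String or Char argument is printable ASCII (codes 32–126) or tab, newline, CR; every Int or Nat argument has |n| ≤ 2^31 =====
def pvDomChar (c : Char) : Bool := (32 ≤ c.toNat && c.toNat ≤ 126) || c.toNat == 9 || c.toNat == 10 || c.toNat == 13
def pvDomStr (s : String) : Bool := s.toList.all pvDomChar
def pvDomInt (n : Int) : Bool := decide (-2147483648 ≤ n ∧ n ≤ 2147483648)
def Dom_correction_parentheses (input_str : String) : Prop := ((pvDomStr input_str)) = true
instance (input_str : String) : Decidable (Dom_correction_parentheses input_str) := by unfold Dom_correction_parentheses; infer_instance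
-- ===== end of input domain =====

-- B precomputes per-index run ends in one backward pass (O(n)) instead of A's rescan at each '(' and quadratic '+='.

-- the module constant `alphabet` (note: it omits 'v' and 'V'), shared character class used by both Pythons
def pvAlphabet : List Char := "abcdefghijklmnopqrstuwxyzABCDEFGHIJKLMNOPQRSTUWXYZ".toList
-- `c.isalpha() and c in alphabet` (exact on the ASCII domain)
def pvIsAB (c : Char) : Bool := c.isAlpha && pvAlphabet.contains c

-- ===== PORT A =====
-- inner `while j < len and s[j] == '~'`
def scanT (cs : List Char) (j : Nat) : Nat :=
  if h : j < cs.length ∧ cs[j]! = '~' then scanT cs (j + 1) else j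
  termination_by cs.length - j
  decreasing_by omega

-- inner `while k < len and s[k].isalpha() and s[k] in alphabet`
def scanL (cs : List Char) (j : Nat) : Nat :=
  if h : j < cs.length ∧ pvIsAB cs[j]! = true then scanL cs (j + 1) else j
  termination_by cs.length - j
  decreasing_by omega

theorem scanT_ge (cs : List Char) (j : Nat) : j ≤ scanT cs j := by
  fun_induction scanT with
  | case1 j h ih => omega
  | case2 j h => omega

theorem scanL_ge (cs : List Char) (j : Nat) : j ≤ scanL cs j := by
  fun_induction scanL with
  | case1 j h ih => omega
  | case2 j h => omega

-- A's outer while loop; output accumulated in `acc` (the `output_str +=`)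
def goA (cs : List Char) (i : Nat) (acc : List Char) : List Char :=
  if hi : i < cs.length then
    if cs[i]! = '(' then
      let j := scanT cs (i + 1)
      let k := scanL cs j
      if hk : k < cs.length ∧ cs[k]! = ')' then
        goA cs (k + 1) (acc ++ ((cs.drop (i + 1)).take (k - (i + 1))))
      else
        goA cs (i + 1) (acc ++ [cs[i]!])
    else
      goA cs (i + 1) (acc ++ [cs[i]!])
  else acc
  termination_by cs.length - i
  decreasing_by
  · have h1 := scanT_ge cs (i + 1)
    have h2 := scanL_ge cs (scanT cs (i + 1))
    omega
  · omega
  · omega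

def correction_parentheses (input_str : String) : String :=
  String.mk (goA input_str.toList 0 [])

-- ===== PORT B =====
-- backward fill of tilde_end: list of values for indices i..n (tilde_end[i] built from tilde_end[i+1])
def fillT (cs : List Char) (i : Nat) : List Nat :=
  if h : i < cs.length then
    let rest := fillT cs (i + 1)
    (if cs[i]! = '~' then rest.headD cs.length else i) :: rest
  else [cs.length]
  termination_by cs.length - i
  decreasing_by omega

-- backward fill of alpha_end
def fillA (cs : List Char) (i : Nat) : List Nat :=
  if h : i < cs.length then
    let rest := fillA cs (i + 1)
    (if pvIsAB cs[i]! then rest.headD cs.length else i) :: rest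
  else [cs.length]
  termination_by cs.length - i
  decreasing_by omega

-- B's main while loop, producing the `parts` list ("".join at the end = flatten).
-- `max (k+1) (i+1)` is only a termination guard: k ≥ i+1 always holds for the filled arrays.
def goB (cs : List Char) (t a : List Nat) (i : Nat) : List (List Char) :=
  if hi : i < cs.length then
    if cs[i]! = '(' then
      let k := a.getD (t.getD (i + 1) 0) 0
      if k < cs.length ∧ cs[k]! = ')' then
        ((cs.drop (i + 1)).take (k - (i + 1))) :: goB cs t a (max (k + 1) (i + 1))
      else
        [cs[i]!] :: goB cs t a (i + 1)
    else
      [cs[i]!] :: goB cs t a (i + 1)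
  else []
  termination_by cs.length - i
  decreasing_by
  · have := Nat.le_max_left (k + 1) (i + 1)
    have := Nat.le_max_right (k + 1) (i + 1)
    omega
  · omega
  · omega

def correction_parentheses_alt (input_str : String) : String :=
  let cs := input_str.toList
  String.mk ((goB cs (fillT cs 0) (fillA cs 0) 0).flatten)

-- ===== PRECONDITION & SPEC =====
def Spec_correction_parentheses (input_str : String) (out : String) : Prop := out = correction_parentheses_alt input_str
instance (input_str : String) (out : String) : Decidable (Spec_correction_parentheses input_str out) := by unfold Spec_correction_parentheses; infer_instance

-- ===== CLAIM (what is proved, stated in full; the proofs are below) =====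
def Claim_equal_correction_parentheses : Prop := ∀ (input_str : String), Dom_correction_parentheses input_str → Spec_correction_parentheses input_str (correction_parentheses input_str)

-- ===== LEMMAS AND PROOFS =====

theorem scanT_le (cs : List Char) (j : Nat) (h : j ≤ cs.length) : scanT cs j ≤ cs.length := by
  fun_induction scanT with
  | case1 j h' ih => exact ih (by omega)
  | case2 j h' => exact h

theorem fillT_ne_nil (cs : List Char) (i : Nat) : fillT cs i ≠ [] := by
  rw [fillT]; split <;> simp

theorem fillA_ne_nil (cs : List Char) (i : Nat) : fillA cs i ≠ [] := by
  rw [fillA]; split <;> simp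

theorem fillT_getD (cs : List Char) (i j : Nat) (hij : i ≤ j) (hj : j ≤ cs.length) :
    (fillT cs i).getD (j - i) 0 = scanT cs j := by
  fun_induction fillT cs i generalizing j with
  | case1 i h rest ih =>
    rcases Nat.eq_or_lt_of_le hij with rfl | hlt
    · rw [Nat.sub_self, List.getD_cons_zero]
      by_cases hc : cs[i]! = '~'
      · have hne := fillT_ne_nil cs (i + 1)
        rw [if_pos hc]
        have hrest : (fillT cs (i+1)).headD cs.length = (fillT cs (i+1)).getD 0 0 := by
          cases hr : fillT cs (i+1) with
          | nil => exact absurd hr hne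
          | cons x xs => simp
        rw [hrest, scanT, dif_pos (show i < cs.length ∧ cs[i]! = '~' from ⟨h, hc⟩)]
        have := ih (i + 1) (le_refl _) (by omega)
        simpa using this
      · rw [if_neg hc, scanT, dif_neg (fun hh => hc hh.2)]
    · have he : j - i = (j - (i + 1)) + 1 := by omega
      rw [he, List.getD_cons_succ]
      exact ih j (by omega) hj
  | case2 i h =>
    have : j = cs.length := by omega
    subst this
    have he : cs.length - i = 0 := by omega
    rw [he, List.getD_cons_zero, scanT]
    simp

theorem fillA_getD (cs : List Char) (i j : Nat) (hij : i ≤ j) (hj : j ≤ cs.length) :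
    (fillA cs i).getD (j - i) 0 = scanL cs j := by
  fun_induction fillA cs i generalizing j with
  | case1 i h rest ih =>
    rcases Nat.eq_or_lt_of_le hij with rfl | hlt
    · rw [Nat.sub_self, List.getD_cons_zero]
      by_cases hc : pvIsAB cs[i]! = true
      · have hne := fillA_ne_nil cs (i + 1)
        rw [if_pos hc]
        have hrest : (fillA cs (i+1)).headD cs.length = (fillA cs (i+1)).getD 0 0 := by
          cases hr : fillA cs (i+1) with
          | nil => exact absurd hr hne
          | cons x xs => simp
        rw [hrest, scanL, dif_pos (show i < cs.length ∧ pvIsAB cs[i]! = true from ⟨h, hc⟩)]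
        have := ih (i + 1) (le_refl _) (by omega)
        simpa using this
      · rw [if_neg hc, scanL, dif_neg (fun hh => hc hh.2)]
    · have he : j - i = (j - (i + 1)) + 1 := by omega
      rw [he, List.getD_cons_succ]
      exact ih j (by omega) hj
  | case2 i h =>
    have : j = cs.length := by omega
    subst this
    have he : cs.length - i = 0 := by omega
    rw [he, List.getD_cons_zero, scanL]
    simp

theorem goA_eq_goB (cs : List Char) (i : Nat) (acc : List Char) :
    goA cs i acc = acc ++ (goB cs (fillT cs 0) (fillA cs 0) i).flatten := by
  fun_induction goA with
  | case1 i acc hi hc j k hk ih =>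
    rw [goB]
    have ht : (fillT cs 0).getD (i + 1) 0 = scanT cs (i + 1) := by
      simpa using fillT_getD cs 0 (i + 1) (by omega) (by omega)
    have hT1 : i + 1 ≤ scanT cs (i + 1) := scanT_ge cs (i + 1)
    have hTn : scanT cs (i + 1) ≤ cs.length := scanT_le cs (i + 1) (by omega)
    have ha : (fillA cs 0).getD (scanT cs (i + 1)) 0 = scanL cs (scanT cs (i + 1)) := by
      simpa using fillA_getD cs 0 (scanT cs (i + 1)) (by omega) hTn
    have hL1 : scanT cs (i + 1) ≤ scanL cs (scanT cs (i + 1)) := scanL_ge cs _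
    rw [dif_pos hi, if_pos hc, ht, ha, if_pos hk]
    have hmax : max (scanL cs (scanT cs (i + 1)) + 1) (i + 1) = scanL cs (scanT cs (i + 1)) + 1 := by
      omega
    rw [hmax, ih]
    simp only [j, k]
    simp
  | case2 i acc hi hc j k hk ih =>
    rw [goB]
    have ht : (fillT cs 0).getD (i + 1) 0 = scanT cs (i + 1) := by
      simpa using fillT_getD cs 0 (i + 1) (by omega) (by omega)
    have hTn : scanT cs (i + 1) ≤ cs.length := scanT_le cs (i + 1) (by omega)
    have ha : (fillA cs 0).getD (scanT cs (i + 1)) 0 = scanL cs (scanT cs (i + 1)) := by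
      simpa using fillA_getD cs 0 (scanT cs (i + 1)) (by omega) hTn
    rw [dif_pos hi, if_pos hc, ht, ha, if_neg hk, ih]
    simp
  | case3 i acc hi hc ih =>
    rw [goB, dif_pos hi, if_neg hc, ih]
    simp
  | case4 i acc hi =>
    rw [goB, dif_neg hi]
    simp

-- ===== VERDICT (by name: the statement is the Claim_ definition above) =====
theorem correction_parentheses_spec : Claim_equal_correction_parentheses := by
  intro s _
  unfold Spec_correction_parentheses correction_parentheses correction_parentheses_alt
  rw [goA_eq_goB]
  simp
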